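-- pv_equiv track=rewrite | github.com/singhvishal59515-design/dwsim-agentic-ai | backend/flowsheet_builder.py | _fuzzy_match_compound
-- ===== SOURCE A (Python) =====
-- from typing import Any, Dict, List, Optional, Tuple
--
-- def _fuzzy_match_compound(name: str, available: List[str]) -> Optional[str]:
--     """Return the best matching compound name from available list."""
--     nl = name.lower().strip()
--     # Exact match
--     for a in available:
--         if a.lower() == nl:
--             return a
--     # Partial match
--     for a in available:
--         if nl in a.lower() or a.lower() in nl:
--             return a
--     return None
-- ===== SOURCE B (Python) =====
-- from typing import List, Optional
--
-- def _fuzzy_match_compound(name: str, available: List[str]) -> Optional[str]: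
--     """Single scan: return immediately on exact match, remember the first partial."""
--     nl = name.lower().strip()
--     partial = None
--     for a in available:
--         al = a.lower()
--         if al == nl:
--             return a
--         if partial is None and (nl in al or al in nl):
--             partial = a
--     return partial
-- ===== Notes on version B (the rewrite author's own statement) =====
-- stated objective: simpler
-- what changed: Replaces A's two full scans (exact pass, then partial pass) with a single scan that returns on an exact match and carries the first partial candidate in an accumulator.
import Mathlib
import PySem

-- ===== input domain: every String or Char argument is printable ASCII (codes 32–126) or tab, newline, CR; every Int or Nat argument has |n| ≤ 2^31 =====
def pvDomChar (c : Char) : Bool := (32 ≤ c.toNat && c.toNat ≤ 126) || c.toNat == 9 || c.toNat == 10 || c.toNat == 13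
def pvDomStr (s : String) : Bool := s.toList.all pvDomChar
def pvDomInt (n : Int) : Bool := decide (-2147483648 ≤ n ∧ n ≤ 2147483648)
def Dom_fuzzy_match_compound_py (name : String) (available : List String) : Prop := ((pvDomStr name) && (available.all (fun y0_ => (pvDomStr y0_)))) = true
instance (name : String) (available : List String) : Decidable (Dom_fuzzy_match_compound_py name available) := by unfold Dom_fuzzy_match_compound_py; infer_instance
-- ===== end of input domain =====

-- B merges A's two scans (exact pass then partial pass) into one scan carrying the first
-- partial candidate in an accumulator; same return value everywhere.


-- ===== PORT A =====
-- first loop of A: exact match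
def pvAExact (nl : String) : List String → Option String
  | [] => none
  | a :: rest => if PySem.Str.lower a = nl then some a else pvAExact nl rest

-- second loop of A: partial match
def pvAPartial (nl : String) : List String → Option String
  | [] => none
  | a :: rest =>
      if PySem.Str.isIn nl (PySem.Str.lower a) || PySem.Str.isIn (PySem.Str.lower a) nl then some a
      else pvAPartial nl rest

def fuzzy_match_compound_py (name : String) (available : List String) : Option String :=
  let nl := PySem.Str.strip (PySem.Str.lower name)
  match pvAExact nl available with
  | some a => some a
  | none => pvAPartial nl available

-- ===== PORT B =====
-- B's single loop with the remembered first partial candidate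
def pvBGo (nl : String) : List String → Option String → Option String
  | [], partial_ => partial_
  | a :: rest, partial_ =>
      let al := PySem.Str.lower a
      if al = nl then some a
      else pvBGo nl rest
        (if partial_.isNone && (PySem.Str.isIn nl al || PySem.Str.isIn al nl) then some a else partial_)

def fuzzy_match_compound_py_alt (name : String) (available : List String) : Option String :=
  let nl := PySem.Str.strip (PySem.Str.lower name)
  pvBGo nl available none

-- ===== PRECONDITION & SPEC =====
def Spec_fuzzy_match_compound_py (name : String) (available : List String) (out : Option String) : Prop := out = fuzzy_match_compound_py_alt name available
instance (name : String) (available : List String) (out : Option String) : Decidable (Spec_fuzzy_match_compound_py name available out) := by unfold Spec_fuzzy_match_compound_py; infer_instance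

-- ===== CLAIM (what is proved, stated in full; the proofs are below) =====
def Claim_equal_fuzzy_match_compound_py : Prop := ∀ (name : String) (available : List String), Dom_fuzzy_match_compound_py name available → Spec_fuzzy_match_compound_py name available (fuzzy_match_compound_py name available)

-- ===== LEMMAS AND PROOFS =====
-- loop invariant: B's scan returns the exact match if one exists, else the carried
-- accumulator if set, else the first partial match
theorem pvBGo_eq (nl : String) (l : List String) (acc : Option String) :
    pvBGo nl l acc =
      match pvAExact nl l with
      | some r => some r
      | none =>
        match acc with
        | some x => some x
        | none => pvAPartial nl l := by
  induction l generalizing acc with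
  | nil => cases acc <;> simp [pvBGo, pvAExact, pvAPartial]
  | cons a rest ih =>
    by_cases hx : PySem.Str.lower a = nl
    · simp [pvBGo, pvAExact, hx]
    · cases acc with
      | some x => simp [pvBGo, pvAExact, hx, ih]
      | none =>
        simp [pvBGo, pvAExact, pvAPartial, hx, ih]
        rcases hA : pvAExact nl rest with _ | r
        · simp only []
          split_ifs <;> simp
        · simp

-- ===== VERDICT (by name: the statement is the Claim_ definition above) =====
theorem fuzzy_match_compound_py_spec : Claim_equal_fuzzy_match_compound_py := by
  intro name available _
  unfold Spec_fuzzy_match_compound_py fuzzy_match_compound_py fuzzy_match_compound_py_alt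
  rw [pvBGo_eq]
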